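-- pv_equiv track=rewrite | github.com/eollich/Philly-Codefest-2023 | scheduler/python_scripts/ics/ics_control.py | get_time_slot
-- ===== SOURCE A (Python) =====
-- def get_time_slot(list_of_time_slots, hours_needed):
--     new_arr = [list_of_time_slots[0]]
--     if hours_needed == 1:
--         return new_arr
--     for i in range(len(list_of_time_slots)-1):
--         if list_of_time_slots[i+1] - list_of_time_slots[i] == 1:
--             new_arr.append(list_of_time_slots[i+1])
--             if len(new_arr) == hours_needed:
--                 return new_arr
--         else:
--             new_arr = [list_of_time_slots[i+1]]
--     return new_arr
-- ===== SOURCE B (Python) =====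
-- def get_time_slot(list_of_time_slots, hours_needed):
--     # Split into maximal runs of consecutive integers, then pick the answer.
--     runs = []
--     cur = [list_of_time_slots[0]]
--     for x in list_of_time_slots[1:]:
--         if x - cur[-1] == 1:
--             cur.append(x)
--         else:
--             runs.append(cur)
--             cur = [x]
--     runs.append(cur)
--     if hours_needed >= 1:
--         for r in runs:
--             if len(r) >= hours_needed:
--                 return r[:hours_needed]
--     return runs[-1]
-- ===== Notes on version B (the rewrite author's own statement) =====
-- stated objective: alternative
-- what changed: A scans indices with one mutable run buffer and an exact-length early return; B first splits the list into maximal runs of consecutive integers, then returns the prefix of the first run of length >= hours_needed (or the last run if none exists or hours_needed < 1).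
import Mathlib
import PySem

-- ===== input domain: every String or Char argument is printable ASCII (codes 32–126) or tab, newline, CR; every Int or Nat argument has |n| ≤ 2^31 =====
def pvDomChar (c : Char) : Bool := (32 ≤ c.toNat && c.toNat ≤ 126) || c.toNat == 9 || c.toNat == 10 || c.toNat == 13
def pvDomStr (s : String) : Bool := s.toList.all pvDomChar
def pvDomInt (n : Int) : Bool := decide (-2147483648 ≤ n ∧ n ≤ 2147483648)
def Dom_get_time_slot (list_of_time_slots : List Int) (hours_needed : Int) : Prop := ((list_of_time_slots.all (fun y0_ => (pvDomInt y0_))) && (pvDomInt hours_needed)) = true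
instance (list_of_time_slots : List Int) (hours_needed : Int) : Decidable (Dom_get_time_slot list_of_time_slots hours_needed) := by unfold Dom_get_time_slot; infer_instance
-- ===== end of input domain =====

-- B splits the list into maximal consecutive runs and then selects the answer from the runs,
-- instead of A's single index scan with an exact-length early return (objective: alternative).


-- ===== PORT A =====
-- the 'for i in range(len(list)-1)' loop of A, over the remaining index list
def gtsA_loop (lst : List Int) (hours_needed : Int) : List Int → List Int → List Int
  | [], new_arr => new_arr
  | i :: rest, new_arr =>
    if PySem.List.pyGetD lst (i + 1) 0 - PySem.List.pyGetD lst i 0 = 1 then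
      let na := new_arr ++ [PySem.List.pyGetD lst (i + 1) 0]
      if (na.length : Int) = hours_needed then na
      else gtsA_loop lst hours_needed rest na
    else gtsA_loop lst hours_needed rest [PySem.List.pyGetD lst (i + 1) 0]

def get_time_slot (list_of_time_slots : List Int) (hours_needed : Int) : List Int :=
  match PySem.List.pyGet? list_of_time_slots 0 with
  | none => []   -- list_of_time_slots[0] raises IndexError on []; excluded by Pre_
  | some x0 =>
    if hours_needed = 1 then [x0]
    else gtsA_loop list_of_time_slots hours_needed
           (PySem.List.pyRange 0 ((list_of_time_slots.length : Int) - 1) 1) [x0]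

-- ===== PORT B =====
-- split into maximal runs of consecutive integers ('runs.append(cur); cur = [x]' becomes cons)
def gtsB_runs (cur : List Int) : List Int → List (List Int)
  | [] => [cur]
  | x :: xs =>
    if x - PySem.List.pyGetD cur (-1) 0 = 1 then gtsB_runs (cur ++ [x]) xs
    else cur :: gtsB_runs [x] xs

-- 'for r in runs: if len(r) >= hours_needed: return r[:hours_needed]'
def gtsB_find (hours_needed : Int) : List (List Int) → Option (List Int)
  | [] => none
  | r :: rs =>
    if hours_needed ≤ (r.length : Int) then some (PySem.List.slice r none (some hours_needed))
    else gtsB_find hours_needed rs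

def get_time_slot_alt (list_of_time_slots : List Int) (hours_needed : Int) : List Int :=
  match list_of_time_slots with
  | [] => []   -- B's list_of_time_slots[0] raises IndexError on [] too; excluded by Pre_
  | x :: xs =>
    let runs := gtsB_runs [x] xs
    if 1 ≤ hours_needed then
      match gtsB_find hours_needed runs with
      | some r => r
      | none => PySem.List.pyGetD runs (-1) []
    else PySem.List.pyGetD runs (-1) []

-- ===== PRECONDITION & SPEC =====
-- A raises IndexError on the empty list (list_of_time_slots[0]); that is the only exception.
def Pre_get_time_slot (list_of_time_slots : List Int) (hours_needed : Int) : Prop :=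
  list_of_time_slots ≠ []
instance (list_of_time_slots : List Int) (hours_needed : Int) : Decidable (Pre_get_time_slot list_of_time_slots hours_needed) := by unfold Pre_get_time_slot; infer_instance

def pvWitness_get_time_slot : List Int × Int := ([3, 4, 5, 9, 10], 2)

def Spec_get_time_slot (list_of_time_slots : List Int) (hours_needed : Int) (out : List Int) : Prop := out = get_time_slot_alt list_of_time_slots hours_needed
instance (list_of_time_slots : List Int) (hours_needed : Int) (out : List Int) : Decidable (Spec_get_time_slot list_of_time_slots hours_needed out) := by unfold Spec_get_time_slot; infer_instance

-- ===== CLAIM (what is proved, stated in full; the proofs are below) =====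
def Claim_equal_get_time_slot : Prop := ∀ (list_of_time_slots : List Int) (hours_needed : Int), Dom_get_time_slot list_of_time_slots hours_needed → Pre_get_time_slot list_of_time_slots hours_needed → Spec_get_time_slot list_of_time_slots hours_needed (get_time_slot list_of_time_slots hours_needed)

-- ===== LEMMAS AND PROOFS =====

-- structural rendering of A's loop: prev is lst[i], acc the current run buffer
def aRun (h : Int) : Int → List Int → List Int → List Int
  | _, acc, [] => acc
  | prev, acc, x :: rest =>
    if x - prev = 1 then
      let na := acc ++ [x]
      if (na.length : Int) = h then na else aRun h x na rest
    else aRun h x [x] rest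

lemma gtsA_loop_eq_aRun (lst : List Int) (h : Int) :
    ∀ (k i : Nat) (acc : List Int), i + 1 + k = lst.length →
      gtsA_loop lst h (PySem.List.pyRange (i : Int) ((lst.length : Int) - 1) 1) acc
        = aRun h (PySem.List.pyGetD lst (i : Int) 0) acc (lst.drop (i + 1)) := by
  intro k
  induction k with
  | zero =>
    intro i acc hlen
    rw [PySem.List.pyRange_one_eq_nil (by omega)]
    rw [List.drop_eq_nil_of_le (by omega)]
    rfl
  | succ k ih =>
    intro i acc hlen
    have hi1 : i + 1 < lst.length := by omega
    have hcast : ((i + 1 : Nat) : Int) = (i : Int) + 1 := by push_cast; ring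
    rw [PySem.List.pyRange_one_cons (by omega)]
    rw [List.drop_eq_getElem_cons hi1]
    have hg1 : PySem.List.pyGetD lst ((i : Int) + 1) 0 = lst[i + 1] := by
      rw [← hcast, PySem.List.pyGetD_natCast, List.getD_eq_getElem _ _ hi1]
    simp only [gtsA_loop, aRun, hg1]
    split_ifs with hc hl
    · rfl
    · have := ih (i + 1) (acc ++ [lst[i + 1]]) (by omega)
      rw [hcast, hg1] at this
      exact this
    · have := ih (i + 1) [lst[i + 1]] (by omega)
      rw [hcast, hg1] at this
      exact this

lemma gtsB_runs_shape (xs : List Int) : ∀ cur : List Int,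
    ∃ t rs, gtsB_runs cur xs = (cur ++ t) :: rs := by
  induction xs with
  | nil => intro cur; exact ⟨[], [], by simp [gtsB_runs]⟩
  | cons x xs ih =>
    intro cur
    rw [gtsB_runs]
    by_cases hc : x - PySem.List.pyGetD cur (-1) 0 = 1
    · obtain ⟨t, rs, hshape⟩ := ih (cur ++ [x])
      exact ⟨[x] ++ t, rs, by simp [hc, hshape]⟩
    · exact ⟨[], gtsB_runs [x] xs, by simp [hc]⟩

lemma gtsB_runs_ne_nil (xs cur : List Int) : gtsB_runs cur xs ≠ [] := by
  obtain ⟨t, rs, hshape⟩ := gtsB_runs_shape xs cur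
  simp [hshape]

lemma pyGetD_neg_one_cons {r : List Int} {rest : List (List Int)} (hr : rest ≠ []) :
    PySem.List.pyGetD (r :: rest) (-1) ([] : List Int)
      = PySem.List.pyGetD rest (-1) ([] : List Int) := by
  rw [PySem.List.pyGetD_neg_one (r :: rest) [] (by simp),
      PySem.List.pyGetD_neg_one rest [] hr, List.getLast_cons hr]

-- the selection phase of B for hours_needed ≥ 1
def combine (h : Int) (runs : List (List Int)) : List Int :=
  (gtsB_find h runs).getD (PySem.List.pyGetD runs (-1) [])

lemma aRun_eq_combine (h : Int) : ∀ (xs cur : List Int) (prev : Int),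
    cur ≠ [] → PySem.List.pyGetD cur (-1) 0 = prev → (cur.length : Int) < h →
    aRun h prev cur xs = combine h (gtsB_runs cur xs) := by
  intro xs
  induction xs with
  | nil =>
    intro cur prev hne hlast hlen
    rw [gtsB_runs, aRun]
    unfold combine
    rw [gtsB_find, if_neg (by omega), gtsB_find]
    rw [PySem.List.pyGetD_neg_one [cur] [] (by simp)]
    simp
  | cons x xs ih =>
    intro cur prev hne hlast hlen
    simp only [gtsB_runs, aRun, hlast]
    split_ifs with hc hl
    · obtain ⟨t, rs, hshape⟩ := gtsB_runs_shape xs (cur ++ [x])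
      unfold combine
      rw [hshape, gtsB_find, if_pos (by simp at hl ⊢; omega)]
      rw [PySem.List.slice_to _ (by simp at hl; omega)]
      have hnat : h.toNat = (cur ++ [x]).length := by simp at hl ⊢; omega
      simp only [Option.getD_some]
      rw [hnat, List.take_left]
    · exact ih (cur ++ [x]) x (by simp)
        (PySem.List.pyGetD_neg_one_append_singleton cur x 0) (by simp at hl ⊢; omega)
    · have hlen1 : ((([x] : List Int).length : Int)) < h := by
        have := List.length_pos_of_ne_nil hne
        simp; omega
      rw [ih [x] x (by simp)
        (by rw [PySem.List.pyGetD_neg_one [x] 0 (by simp)]; rfl) hlen1]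
      unfold combine
      rw [gtsB_find, if_neg (by omega)]
      rw [pyGetD_neg_one_cons (gtsB_runs_ne_nil xs [x])]

lemma aRun_eq_last (h : Int) (hh : h ≤ 0) : ∀ (xs cur : List Int) (prev : Int),
    cur ≠ [] → PySem.List.pyGetD cur (-1) 0 = prev →
    aRun h prev cur xs = PySem.List.pyGetD (gtsB_runs cur xs) (-1) [] := by
  intro xs
  induction xs with
  | nil =>
    intro cur prev hne hlast
    rw [gtsB_runs, aRun, PySem.List.pyGetD_neg_one [cur] [] (by simp)]
    simp
  | cons x xs ih =>
    intro cur prev hne hlast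
    simp only [gtsB_runs, aRun, hlast]
    split_ifs with hc hl
    · exact absurd hl (by simp; omega)
    · exact ih (cur ++ [x]) x (by simp)
        (PySem.List.pyGetD_neg_one_append_singleton cur x 0)
    · rw [ih [x] x (by simp)
        (by rw [PySem.List.pyGetD_neg_one [x] 0 (by simp)]; rfl)]
      rw [pyGetD_neg_one_cons (gtsB_runs_ne_nil xs [x])]

-- ===== VERDICT (by name: the statement is the Claim_ definition above) =====
theorem get_time_slot_spec : Claim_equal_get_time_slot := by
  intro lst h _ hpre
  unfold Spec_get_time_slot
  match lst with
  | [] => exact absurd rfl hpre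
  | x :: xs =>
    have hget : PySem.List.pyGet? (x :: xs) 0 = some x := by
      simp [PySem.List.pyGet?, PySem.List.pyIdx?]
    have hmatch : ∀ (o : Option (List Int)) (d : List Int),
        (match o with | some r => r | none => d) = o.getD d := by
      intro o d; cases o <;> rfl
    have hloop : gtsA_loop (x :: xs) h
        (PySem.List.pyRange 0 (((x :: xs).length : Int) - 1) 1) [x]
        = aRun h x [x] xs := by
      have := gtsA_loop_eq_aRun (x :: xs) h xs.length 0 [x]
        (by simp only [List.length_cons]; omega)
      simpa [PySem.List.pyGetD_zero_cons] using this
    simp only [get_time_slot, get_time_slot_alt, hget, hmatch]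
    by_cases h1 : h = 1
    · subst h1
      rw [if_pos rfl, if_pos (by omega : (1 : Int) ≤ 1)]
      obtain ⟨t, rs, hshape⟩ := gtsB_runs_shape xs [x]
      rw [hshape, gtsB_find, if_pos (by simp)]
      rw [PySem.List.slice_to _ (by omega)]
      simp
    · rw [if_neg h1, hloop]
      by_cases hge : (1 : Int) ≤ h
      · rw [if_pos hge]
        exact aRun_eq_combine h xs [x] x (by simp)
          (by rw [PySem.List.pyGetD_neg_one [x] 0 (by simp)]; rfl)
          (by simp only [List.length_cons, List.length_nil]; omega)
      · rw [if_neg hge]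
        exact aRun_eq_last h (by omega) xs [x] x (by simp)
          (by rw [PySem.List.pyGetD_neg_one [x] 0 (by simp)]; rfl)
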